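-- pv_equiv track=rewrite | github.com/y2cl/collectibles_manager | utility/enhanced_mtg_sets.py | get_game_type
-- ===== SOURCE A (Python) =====
-- GAME_TYPE_MAPPING = {
--     "Main": ["core", "expansion", "masters", "eternal", "masterpiece", "from_the_vault", "starter", "draft_innovation"],
--     "Digital": ["alchemy", "treasure_chest"],
--     "Commander": ["arsenal", "spellbook", "commander"],
--     "Planechase": ["planechase"],
--     "Pre-Built": ["premium_deck", "duel_deck", "archenemy"],
--     "Vanguard": ["vanguard"],
--     "Funny": ["funny"],
--     "Other": ["box", "promo", "token", "memorabilia", "minigame"]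
-- }
--
-- def get_game_type(set_type):
--     """Get game type based on set type"""
--     if not set_type:
--         return "Other"
--     set_type = set_type.lower()
--     for game_type, set_types in GAME_TYPE_MAPPING.items():
--         if set_type in set_types:
--             return game_type
--     return "Other"
-- ===== SOURCE B (Python) =====
-- GAME_TYPE_MAPPING = {
--     "Main": ["core", "expansion", "masters", "eternal", "masterpiece", "from_the_vault", "starter", "draft_innovation"],
--     "Digital": ["alchemy", "treasure_chest"],
--     "Commander": ["arsenal", "spellbook", "commander"],
--     "Planechase": ["planechase"],
--     "Pre-Built": ["premium_deck", "duel_deck", "archenemy"],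
--     "Vanguard": ["vanguard"],
--     "Funny": ["funny"],
--     "Other": ["box", "promo", "token", "memorabilia", "minigame"]
-- }
--
-- REVERSE = {st: gt for gt, lst in GAME_TYPE_MAPPING.items() for st in lst}
--
-- def get_game_type(set_type):
--     """Get game type based on set type"""
--     if not set_type:
--         return "Other"
--     return REVERSE.get(set_type.lower(), "Other")
-- ===== Notes on version B (the rewrite author's own statement) =====
-- stated objective: simpler
-- what changed: A precomputed flat reverse index {set_type: game_type} replaces A's per-call scan over the groups, so the body is a single dictionary lookup instead of a loop with list membership tests.
import Mathlib
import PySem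

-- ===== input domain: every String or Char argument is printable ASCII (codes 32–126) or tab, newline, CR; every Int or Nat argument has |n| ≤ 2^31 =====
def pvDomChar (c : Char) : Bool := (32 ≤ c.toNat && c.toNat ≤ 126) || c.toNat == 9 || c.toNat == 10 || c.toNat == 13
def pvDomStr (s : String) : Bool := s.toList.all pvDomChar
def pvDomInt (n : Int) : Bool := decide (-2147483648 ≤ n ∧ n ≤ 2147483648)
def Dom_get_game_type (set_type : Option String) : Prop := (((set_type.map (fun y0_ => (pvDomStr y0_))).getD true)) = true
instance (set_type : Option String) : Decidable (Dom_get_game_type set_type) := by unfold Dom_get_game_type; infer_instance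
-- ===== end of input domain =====

-- B replaces A's per-call loop over the groups with one precomputed flat reverse index; simpler body.

-- ===== PORT A =====
-- GAME_TYPE_MAPPING, in dict insertion order
def pvMapping : List (String × List String) :=
  [("Main", ["core", "expansion", "masters", "eternal", "masterpiece", "from_the_vault", "starter", "draft_innovation"]),
   ("Digital", ["alchemy", "treasure_chest"]),
   ("Commander", ["arsenal", "spellbook", "commander"]),
   ("Planechase", ["planechase"]),
   ("Pre-Built", ["premium_deck", "duel_deck", "archenemy"]),
   ("Vanguard", ["vanguard"]),
   ("Funny", ["funny"]),
   ("Other", ["box", "promo", "token", "memorabilia", "minigame"])]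

-- the for-loop with early return over GAME_TYPE_MAPPING.items()
def pvLoopA (s : String) : List (String × List String) → String
  | [] => "Other"
  | (g, lst) :: rest => if lst.contains s then g else pvLoopA s rest

def get_game_type (set_type : Option String) : String :=
  match set_type with
  | none => "Other"                       -- `if not set_type`
  | some s => if s = "" then "Other" else pvLoopA (PySem.Str.lower s) pvMapping

-- ===== PORT B =====
-- REVERSE = {st: gt for gt, lst in GAME_TYPE_MAPPING.items() for st in lst}
def pvReverse : PySem.Dict String String :=
  pvMapping.foldl (fun d p => p.2.foldl (fun d t => d.insert t p.1) d) PySem.Dict.empty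

def get_game_type_alt (set_type : Option String) : String :=
  match set_type with
  | none => "Other"
  | some s => if s = "" then "Other" else pvReverse.getD (PySem.Str.lower s) "Other"

-- ===== PRECONDITION & SPEC =====
def Spec_get_game_type (set_type : Option String) (out : String) : Prop := out = get_game_type_alt set_type
instance (set_type : Option String) (out : String) : Decidable (Spec_get_game_type set_type out) := by unfold Spec_get_game_type; infer_instance

-- ===== CLAIM (what is proved, stated in full; the proofs are below) =====
def Claim_equal_get_game_type : Prop := ∀ (set_type : Option String), Dom_get_game_type set_type → Spec_get_game_type set_type (get_game_type set_type)

-- ===== LEMMAS AND PROOFS =====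

-- first-match association lookup, the shape shared by both sides
def pvAssoc (s : String) : List (String × String) → String
  | [] => "Other"
  | (k, v) :: rest => if k == s then v else pvAssoc s rest

lemma pvAssoc_map_append (s g : String) (lst : List String) (L : List (String × String)) :
    pvAssoc s (lst.map (fun t => (t, g)) ++ L) =
      if lst.contains s then g else pvAssoc s L := by
  induction lst with
  | nil => simp
  | cons t ts ih =>
      by_cases h : s = t
      · subst h
        have hc : (s :: ts).contains s = true := by simp
        simp only [List.map_cons, List.cons_append, pvAssoc, BEq.rfl, if_true, hc]
      · simp [pvAssoc, h, Ne.symm h, ih]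

lemma pvLoopA_eq_assoc (s : String) (m : List (String × List String)) :
    pvLoopA s m = pvAssoc s (m.flatMap (fun p => p.2.map (fun t => (t, p.1)))) := by
  induction m with
  | nil => rfl
  | cons p rest ih =>
      obtain ⟨g, lst⟩ := p
      simp [pvLoopA, List.flatMap_cons, pvAssoc_map_append, ih]

lemma pvGetD_mk_eq_assoc (s : String) (L : List (String × String)) :
    (PySem.Dict.mk L).getD s "Other" = pvAssoc s L := by
  induction L with
  | nil => rfl
  | cons p rest ih =>
      obtain ⟨k, v⟩ := p
      by_cases h : k == s <;>
        simp [PySem.Dict.getD, PySem.Dict.get?_mk_cons, h, pvAssoc] <;>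
        simpa [PySem.Dict.getD] using ih

lemma pvReverse_items :
    pvReverse = PySem.Dict.mk (pvMapping.flatMap (fun p => p.2.map (fun t => (t, p.1)))) := by
  decide

lemma pvLoop_eq_reverse (s : String) :
    pvLoopA s pvMapping = pvReverse.getD s "Other" := by
  rw [pvReverse_items, pvGetD_mk_eq_assoc, pvLoopA_eq_assoc]

-- ===== VERDICT (by name: the statement is the Claim_ definition above) =====
theorem get_game_type_spec : Claim_equal_get_game_type := by
  intro set_type _
  unfold Spec_get_game_type get_game_type get_game_type_alt
  cases set_type with
  | none => rfl
  | some s =>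
      by_cases h : s = "" <;> simp [h, pvLoop_eq_reverse]
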